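-- pv_equiv track=rewrite | github.com/vutl/Container-Stitching | stit_tts/sources/main_app/top/utils/cor_util.py | filter_gucors
-- ===== SOURCE A (Python) =====
-- def filter_gucors(gu_cors, w, h):
--     gu_cors_output = []
--     max_x_gucor = max(gu_cors, key=lambda x: x[0])[0]
--     min_x_gucor = min(gu_cors, key=lambda x: x[0])[0]
--
--     top_gucors = [cor for cor in gu_cors if cor[1] < h//2]
--     bot_gucors = [cor for cor in gu_cors if cor[1] > h//2]
--     top_gucors = sorted(top_gucors, key=lambda x: x[0])
--     bot_gucors = sorted(bot_gucors, key=lambda x: x[0])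
--
--     if len(top_gucors) == 2:
--         if max_x_gucor < w//2:
--             gu_cors_output.append(top_gucors[1])
--         else:
--             gu_cors_output.append(top_gucors[0])
--     else:
--         gu_cors_output.append(top_gucors[0])
--
--     if len(bot_gucors) == 2:
--         if min_x_gucor < w//2:
--             gu_cors_output.append(bot_gucors[1])
--         else:
--             gu_cors_output.append(bot_gucors[0])
--     else:
--         gu_cors_output.append(bot_gucors[0])
--
--     return gu_cors_output
-- ===== SOURCE B (Python) =====
-- def filter_gucors(gu_cors, w, h):
--     max_x_gucor = max(gu_cors, key=lambda c: c[0])[0]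
--     min_x_gucor = min(gu_cors, key=lambda c: c[0])[0]
--     half = h // 2
--     top_gucors = [c for c in gu_cors if c[1] < half]
--     bot_gucors = [c for c in gu_cors if c[1] > half]
--
--     def pick(lst, want_second):
--         if len(lst) == 2:
--             a, b = lst
--             lo, hi = (a, b) if a[0] <= b[0] else (b, a)
--             return hi if want_second else lo
--         return min(lst, key=lambda c: c[0])
--
--     return [pick(top_gucors, max_x_gucor < w // 2),
--             pick(bot_gucors, min_x_gucor < w // 2)]
-- ===== Notes on version B (the rewrite author's own statement) =====
-- stated objective: simpler
-- what changed: Drops both sorted() calls: each side's corner is chosen by a direct pairwise compare when exactly two candidates exist and by min(..., key=x) otherwise, so no list is ever sorted.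
import Mathlib
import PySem

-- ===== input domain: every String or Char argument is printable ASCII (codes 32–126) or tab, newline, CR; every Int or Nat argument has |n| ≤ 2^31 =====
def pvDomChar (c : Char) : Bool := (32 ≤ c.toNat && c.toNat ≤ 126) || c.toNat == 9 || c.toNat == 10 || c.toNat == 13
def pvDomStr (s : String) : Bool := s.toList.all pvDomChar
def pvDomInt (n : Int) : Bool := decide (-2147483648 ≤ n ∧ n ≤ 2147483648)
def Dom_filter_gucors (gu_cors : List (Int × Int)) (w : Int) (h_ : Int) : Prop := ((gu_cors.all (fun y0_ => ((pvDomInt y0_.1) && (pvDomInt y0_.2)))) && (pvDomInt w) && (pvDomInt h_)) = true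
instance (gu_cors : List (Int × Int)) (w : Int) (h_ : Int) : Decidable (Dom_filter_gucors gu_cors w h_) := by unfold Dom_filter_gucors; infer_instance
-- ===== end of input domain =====

-- B replaces the two sorted() calls by a pairwise compare (two candidates) / min-by-x (otherwise): simpler selection, no sort.

-- ===== PORT A =====
def filter_gucors (gu_cors : List (Int × Int)) (w : Int) (h_ : Int) : List (Int × Int) :=
  match PySem.List.max? gu_cors (fun c => c.1), PySem.List.min? gu_cors (fun c => c.1) with
  | some mxc, some mnc =>
    let max_x_gucor := mxc.1
    let min_x_gucor := mnc.1
    let top_gucors := gu_cors.filter (fun c => decide (c.2 < PySem.Int.floordiv h_ 2))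
    let bot_gucors := gu_cors.filter (fun c => decide (c.2 > PySem.Int.floordiv h_ 2))
    let top_s := PySem.List.sorted top_gucors (fun c => c.1) false
    let bot_s := PySem.List.sorted bot_gucors (fun c => c.1) false
    let o1 : Option (Int × Int) :=
      if top_s.length = 2 then
        if max_x_gucor < PySem.Int.floordiv w 2 then PySem.List.pyGet? top_s 1
        else PySem.List.pyGet? top_s 0
      else PySem.List.pyGet? top_s 0
    let o2 : Option (Int × Int) :=
      if bot_s.length = 2 then
        if min_x_gucor < PySem.Int.floordiv w 2 then PySem.List.pyGet? bot_s 1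
        else PySem.List.pyGet? bot_s 0
      else PySem.List.pyGet? bot_s 0
    match o1, o2 with
    | some a, some b => [a, b]
    | _, _ => []
  | _, _ => []

-- ===== PORT B =====
def pickAlt (lst : List (Int × Int)) (want_second : Bool) : Option (Int × Int) :=
  match lst with
  | [a, b] =>
      let lohi := if a.1 ≤ b.1 then (a, b) else (b, a)
      some (if want_second then lohi.2 else lohi.1)
  | _ => PySem.List.min? lst (fun c => c.1)

def filter_gucors_alt (gu_cors : List (Int × Int)) (w : Int) (h_ : Int) : List (Int × Int) :=
  match PySem.List.max? gu_cors (fun c => c.1) with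
  | none => []
  | some mxc =>
    match PySem.List.min? gu_cors (fun c => c.1) with
    | none => []
    | some mnc =>
      let half := PySem.Int.floordiv h_ 2
      let top_gucors := gu_cors.filter (fun c => decide (c.2 < half))
      let bot_gucors := gu_cors.filter (fun c => decide (c.2 > half))
      match pickAlt top_gucors (decide (mxc.1 < PySem.Int.floordiv w 2)) with
      | none => []
      | some a =>
        match pickAlt bot_gucors (decide (mnc.1 < PySem.Int.floordiv w 2)) with
        | none => []
        | some b => [a, b]

-- ===== PRECONDITION & SPEC =====
-- Pre_ excludes exactly the inputs on which A raises: empty gu_cors (ValueError from max) and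
-- inputs with no corner strictly above, or none strictly below, h//2 (IndexError on [0]).
def Pre_filter_gucors (gu_cors : List (Int × Int)) (w : Int) (h_ : Int) : Prop :=
  (∃ c ∈ gu_cors, c.2 < PySem.Int.floordiv h_ 2) ∧ (∃ c ∈ gu_cors, c.2 > PySem.Int.floordiv h_ 2)
instance (gu_cors : List (Int × Int)) (w : Int) (h_ : Int) : Decidable (Pre_filter_gucors gu_cors w h_) := by unfold Pre_filter_gucors; infer_instance
def pvWitness_filter_gucors : (List (Int × Int)) × Int × Int := ([(1, 0), (5, 10)], 6, 10)

def Spec_filter_gucors (gu_cors : List (Int × Int)) (w : Int) (h_ : Int) (out : List (Int × Int)) : Prop := out = filter_gucors_alt gu_cors w h_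
instance (gu_cors : List (Int × Int)) (w : Int) (h_ : Int) (out : List (Int × Int)) : Decidable (Spec_filter_gucors gu_cors w h_ out) := by unfold Spec_filter_gucors; infer_instance

-- ===== CLAIM (what is proved, stated in full; the proofs are below) =====
def Claim_equal_filter_gucors : Prop := ∀ (gu_cors : List (Int × Int)) (w : Int) (h_ : Int), Dom_filter_gucors gu_cors w h_ → Pre_filter_gucors gu_cors w h_ → Spec_filter_gucors gu_cors w h_ (filter_gucors gu_cors w h_)

-- ===== LEMMAS AND PROOFS =====

def pvMinStep (o : Option (Int × Int)) (x : Int × Int) : Option (Int × Int) :=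
  match o with
  | none => some x
  | some m => if x.1 < m.1 then some x else some m

theorem head_insertBy (acc : List (Int × Int)) (x : Int × Int) :
    (PySem.List.insertBy (fun a b => decide (a.1 < b.1)) x acc).head? = pvMinStep acc.head? x := by
  cases acc with
  | nil => rfl
  | cons y ys =>
    simp only [PySem.List.insertBy, pvMinStep, List.head?]
    by_cases h : x.1 < y.1 <;> simp [h]

theorem foldl_insertBy_head (xs acc : List (Int × Int)) :
    (xs.foldl (fun a x => PySem.List.insertBy (fun a b => decide (a.1 < b.1)) x a) acc).head? =
      xs.foldl pvMinStep acc.head? := by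
  induction xs generalizing acc with
  | nil => rfl
  | cons x t ih => simp only [List.foldl_cons, ih, head_insertBy]

theorem head_sorted_eq_min? (lst : List (Int × Int)) :
    (PySem.List.sorted lst (fun c => c.1) false).head? = PySem.List.min? lst (fun c => c.1) := by
  have h := foldl_insertBy_head lst []
  simp only [PySem.List.sorted, Bool.false_eq_true, if_false]
  rw [h, PySem.List.min?]
  apply List.foldl_ext
  intro o x _
  cases o <;> rfl

theorem sel_eq (lst : List (Int × Int)) (p : Prop) [Decidable p] (hne : lst ≠ []) :
    (if (PySem.List.sorted lst (fun c => c.1) false).length = 2 then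
       if p then PySem.List.pyGet? (PySem.List.sorted lst (fun c => c.1) false) 1
       else PySem.List.pyGet? (PySem.List.sorted lst (fun c => c.1) false) 0
     else PySem.List.pyGet? (PySem.List.sorted lst (fun c => c.1) false) 0) =
    pickAlt lst (decide p) := by
  match lst with
  | [] => exact absurd rfl hne
  | [a] =>
    simp [PySem.List.sorted, PySem.List.insertBy, PySem.List.pyGet?, PySem.List.pyIdx?,
      pickAlt, PySem.List.min?]
  | [a, b] =>
    by_cases hba : b.1 < a.1
    · have hab : ¬ a.1 ≤ b.1 := by omega
      by_cases hp : p <;>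
        simp [PySem.List.sorted, PySem.List.insertBy, PySem.List.pyGet?, PySem.List.pyIdx?,
          pickAlt, hba, hab, hp]
    · have hab : a.1 ≤ b.1 := by omega
      by_cases hp : p <;>
        simp [PySem.List.sorted, PySem.List.insertBy, PySem.List.pyGet?, PySem.List.pyIdx?,
          pickAlt, hba, hab, hp]
  | a :: b :: c :: t =>
    have hlen : (PySem.List.sorted (a :: b :: c :: t) (fun c => c.1) false).length ≠ 2 := by
      rw [PySem.List.length_sorted]; simp
    rw [if_neg hlen]
    have hs : PySem.List.sorted (a :: b :: c :: t) (fun c => c.1) false ≠ [] := by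
      rw [Ne, PySem.List.sorted_eq_nil_iff]; simp
    obtain ⟨m, tl, hmt⟩ := List.exists_cons_of_ne_nil hs
    have hhead : (PySem.List.sorted (a :: b :: c :: t) (fun c => c.1) false).head? =
        PySem.List.min? (a :: b :: c :: t) (fun c => c.1) := head_sorted_eq_min? _
    rw [hmt] at hhead
    simp only [List.head?] at hhead
    rw [hmt]
    have h0 : PySem.List.pyGet? (m :: tl) (0 : Int) = some m := by
      simp [PySem.List.pyGet?, PySem.List.pyIdx?]
    rw [h0]
    simp only [pickAlt, ← hhead]

theorem filter_ne_nil_of_mem {c : Int × Int} {gu_cors : List (Int × Int)} {q : Int × Int → Bool}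
    (hc : c ∈ gu_cors) (hq : q c = true) : gu_cors.filter q ≠ [] := by
  intro h
  have := List.mem_filter.mpr ⟨hc, hq⟩
  rw [h] at this; cases this

-- ===== VERDICT (by name: the statement is the Claim_ definition above) =====
theorem filter_gucors_spec : Claim_equal_filter_gucors := by
  intro gu_cors w h_ _ hpre
  obtain ⟨⟨ct, hct, hctlt⟩, ⟨cb, hcb, hcbgt⟩⟩ := hpre
  have hne : gu_cors ≠ [] := by intro h; rw [h] at hct; cases hct
  obtain ⟨mxc, hmx⟩ : ∃ m, PySem.List.max? gu_cors (fun c => c.1) = some m := by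
    cases hx : PySem.List.max? gu_cors (fun c => c.1) with
    | none => exact absurd ((PySem.List.max?_eq_none_iff _ _).mp hx) hne
    | some m => exact ⟨m, rfl⟩
  obtain ⟨mnc, hmn⟩ : ∃ m, PySem.List.min? gu_cors (fun c => c.1) = some m := by
    cases hx : PySem.List.min? gu_cors (fun c => c.1) with
    | none => exact absurd ((PySem.List.min?_eq_none_iff _ _).mp hx) hne
    | some m => exact ⟨m, rfl⟩
  have htop : gu_cors.filter (fun c => decide (c.2 < PySem.Int.floordiv h_ 2)) ≠ [] :=
    filter_ne_nil_of_mem hct (by simpa using hctlt)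
  have hbot : gu_cors.filter (fun c => decide (c.2 > PySem.Int.floordiv h_ 2)) ≠ [] :=
    filter_ne_nil_of_mem hcb (by simpa using hcbgt)
  unfold Spec_filter_gucors filter_gucors filter_gucors_alt
  rw [hmx, hmn]
  simp only []
  rw [sel_eq _ _ htop, sel_eq _ _ hbot]
  rcases pickAlt (gu_cors.filter (fun c => decide (c.2 < PySem.Int.floordiv h_ 2)))
      (decide (mxc.1 < PySem.Int.floordiv w 2)) with _ | a <;>
    rcases pickAlt (gu_cors.filter (fun c => decide (c.2 > PySem.Int.floordiv h_ 2)))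
        (decide (mnc.1 < PySem.Int.floordiv w 2)) with _ | b <;> rfl
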